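-- pv_equiv track=rewrite | github.com/akweury/nesy_causal_p | src/alpha/fol/language.py | unique_combinations_filter
-- ===== SOURCE A (Python) =====
-- import itertools
--
-- def unique_combinations_filter(list_of_lists):
--     """
--     Given a list of lists, return all combinations where one element is chosen from each list,
--     while discarding:
--       - Combinations that contain repeated elements.
--       - Combinations that are duplicates up to ordering (i.e. same set of elements).
--
--     Args:
--         list_of_lists (list of lists): Input lists.
--
--     Returns:
--         list of tuples: Unique combinations (one element per list) meeting the above criteria.
--     """
--     seen = set()  # to track canonical forms (sorted tuples)
--     valid_combos = []  # to store the valid combinations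
--
--     for combo in itertools.product(*list_of_lists):
--         # Discard if any element is repeated.
--         if len(set(combo)) != len(combo):
--             continue
--
--         # Create a canonical representation by sorting the tuple.
--         # This representation will be the same for combinations with the same elements.
--         canonical = tuple(sorted(combo))
--
--         if canonical not in seen:
--             seen.add(canonical)
--             valid_combos.append(combo)
--
--     return valid_combos
-- ===== SOURCE B (Python) =====
-- def unique_combinations_filter(list_of_lists):
--     """DFS over the lists, pruning any branch that reuses an element, so the
--     repeated-element check on full tuples disappears; dedup-by-sorted-tuple
--     is applied at the leaves in the same first-occurrence order."""
--     seen = set()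
--     out = []
--
--     def dfs(i, combo):
--         if i == len(list_of_lists):
--             canonical = tuple(sorted(combo))
--             if canonical not in seen:
--                 seen.add(canonical)
--                 out.append(tuple(combo))
--             return
--         for x in list_of_lists[i]:
--             if x in combo:
--                 continue
--             combo.append(x)
--             dfs(i + 1, combo)
--             combo.pop()
--
--     dfs(0, [])
--     return out
-- ===== Notes on version B (the rewrite author's own statement) =====
-- stated objective: alternative
-- what changed: Replaces the itertools.product loop (materialise every tuple, then filter repeats) with a recursive DFS that skips an element as soon as it already occurs in the partial combination, deduplicating by sorted tuple at the leaves in the same first-occurrence order.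
import Mathlib
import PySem

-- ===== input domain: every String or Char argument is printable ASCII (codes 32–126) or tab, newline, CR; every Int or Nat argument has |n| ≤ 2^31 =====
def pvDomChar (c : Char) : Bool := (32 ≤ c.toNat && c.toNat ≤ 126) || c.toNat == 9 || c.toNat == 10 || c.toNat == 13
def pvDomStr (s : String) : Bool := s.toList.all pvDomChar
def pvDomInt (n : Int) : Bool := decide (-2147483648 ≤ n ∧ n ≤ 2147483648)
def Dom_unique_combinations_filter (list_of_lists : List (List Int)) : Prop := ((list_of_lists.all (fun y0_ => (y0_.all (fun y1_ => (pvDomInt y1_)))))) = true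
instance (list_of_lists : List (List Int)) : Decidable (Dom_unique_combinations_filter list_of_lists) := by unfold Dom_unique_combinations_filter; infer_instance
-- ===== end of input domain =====

-- B replaces A's cartesian-product-then-filter with a DFS that skips repeated
-- elements as soon as they are chosen (objective: alternative); return values proved identical.

-- ===== PORT A =====
-- itertools.product(*list_of_lists), first list varying slowest
def pyProduct : List (List Int) → List (List Int)
  | [] => [[]]
  | l :: ls => l.flatMap (fun x => (pyProduct ls).map (fun rest => x :: rest))

-- one iteration of A's loop body over state (seen, valid_combos)
def stepA (st : PySem.Set (List Int) × List (List Int)) (combo : List Int) :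
    PySem.Set (List Int) × List (List Int) :=
  if (PySem.Set.ofList combo).length ≠ combo.length then st
  else
    let canonical := PySem.List.sorted combo (fun x => x) false
    if PySem.Set.contains st.1 canonical then st
    else (PySem.Set.add st.1 canonical, st.2 ++ [combo])

def unique_combinations_filter (list_of_lists : List (List Int)) : List (List Int) :=
  ((pyProduct list_of_lists).foldl stepA (PySem.Set.empty, [])).2

-- ===== PORT B =====
-- DFS of Source B: choose one unused element per remaining list; at a leaf, canonicalise
-- and record if unseen. State is (seen, out).
def dfsB : List (List Int) → List Int → PySem.Set (List Int) × List (List Int) →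
    PySem.Set (List Int) × List (List Int)
  | [], combo, st =>
    let canonical := PySem.List.sorted combo (fun x => x) false
    if PySem.Set.contains st.1 canonical then st
    else (PySem.Set.add st.1 canonical, st.2 ++ [combo])
  | l :: rest, combo, st =>
    l.foldl (fun st x => if x ∈ combo then st else dfsB rest (combo ++ [x]) st) st

def unique_combinations_filter_alt (list_of_lists : List (List Int)) : List (List Int) :=
  (dfsB list_of_lists [] (PySem.Set.empty, [])).2

-- ===== PRECONDITION & SPEC =====
def Spec_unique_combinations_filter (list_of_lists : List (List Int)) (out : List (List Int)) : Prop := out = unique_combinations_filter_alt list_of_lists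
instance (list_of_lists : List (List Int)) (out : List (List Int)) : Decidable (Spec_unique_combinations_filter list_of_lists out) := by unfold Spec_unique_combinations_filter; infer_instance

-- ===== CLAIM (what is proved, stated in full; the proofs are below) =====
def Claim_equal_unique_combinations_filter : Prop := ∀ (list_of_lists : List (List Int)), Dom_unique_combinations_filter list_of_lists → Spec_unique_combinations_filter list_of_lists (unique_combinations_filter list_of_lists)

-- ===== LEMMAS AND PROOFS =====

-- |set(xs)| = |dedup xs|
lemma len_ofList (xs : List Int) :
    (PySem.Set.ofList xs).length = xs.dedup.length := by
  have h1 : (PySem.Set.ofList xs).Nodup := PySem.Set.nodup_ofList xs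
  have h2 : (PySem.Set.ofList xs).toFinset = xs.toFinset := by
    ext a; simp [PySem.Set.mem_ofList]
  calc (PySem.Set.ofList xs).length
      = (PySem.Set.ofList xs).dedup.length := by rw [List.dedup_eq_self.mpr h1]
    _ = (PySem.Set.ofList xs).toFinset.card := (List.card_toFinset _).symm
    _ = xs.toFinset.card := by rw [h2]
    _ = xs.dedup.length := List.card_toFinset xs

-- len(set(xs)) == len(xs) iff xs has no repeats
lemma len_ofList_eq_iff (xs : List Int) :
    (PySem.Set.ofList xs).length = xs.length ↔ xs.Nodup := by
  rw [len_ofList]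
  constructor
  · intro h
    have := (xs.dedup_sublist).eq_of_length h
    rw [← this]; exact xs.nodup_dedup
  · intro h; rw [List.dedup_eq_self.mpr h]

lemma stepA_of_dup (st : PySem.Set (List Int) × List (List Int)) (l : List Int)
    (h : ¬ l.Nodup) : stepA st l = st := by
  unfold stepA
  rw [if_pos]
  intro hc
  exact h ((len_ofList_eq_iff l).mp hc)

lemma foldl_stepA_dup (ys : List (List Int))
    (h : ∀ y ∈ ys, ¬ y.Nodup) :
    ∀ st, ys.foldl stepA st = st := by
  induction ys with
  | nil => intro st; rfl
  | cons y ys ih =>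
    intro st
    simp only [List.foldl_cons]
    rw [stepA_of_dup st y (h y (by simp))]
    exact ih (fun z hz => h z (by simp [hz])) st

lemma foldl_flatMap {α β σ : Type} (f : α → List β) (g : σ → β → σ)
    (l : List α) : ∀ st, (l.flatMap f).foldl g st =
      l.foldl (fun st x => (f x).foldl g st) st := by
  induction l with
  | nil => intro st; rfl
  | cons a l ih =>
    intro st
    simp only [List.flatMap_cons, List.foldl_append, List.foldl_cons]
    exact ih _

-- the DFS equals A's loop run over the cartesian product of the remaining lists,
-- each tuple prefixed with the repeat-free partial combination built so far
lemma dfs_eq (rem : List (List Int)) :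
    ∀ (combo : List Int) (st : PySem.Set (List Int) × List (List Int)),
      combo.Nodup →
      dfsB rem combo st = ((pyProduct rem).map (fun r => combo ++ r)).foldl stepA st := by
  induction rem with
  | nil =>
    intro combo st h
    have hlen : (PySem.Set.ofList combo).length = combo.length :=
      (len_ofList_eq_iff combo).mpr h
    simp only [pyProduct, List.map_cons, List.map_nil, List.append_nil,
      List.foldl_cons, List.foldl_nil, dfsB, stepA, hlen, ne_eq, not_true_eq_false,
      if_false]
  | cons l rest ih =>
    intro combo st h
    simp only [pyProduct, List.map_flatMap, List.map_map]
    rw [foldl_flatMap]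
    show l.foldl (fun st x => if x ∈ combo then st else dfsB rest (combo ++ [x]) st) st = _
    congr 1
    funext st x
    by_cases hx : x ∈ combo
    · rw [if_pos hx]
      rw [foldl_stepA_dup]
      intro y hy
      simp only [List.mem_map, Function.comp] at hy
      obtain ⟨r, _, hr⟩ := hy
      rw [← hr]
      intro hnd
      rw [List.nodup_append] at hnd
      exact hnd.2.2 x hx x (List.mem_cons_self) rfl
    · rw [if_neg hx]
      have hnd : (combo ++ [x]).Nodup := by
        rw [List.nodup_append]
        refine ⟨h, List.nodup_singleton x, ?_⟩
        intro a ha b hb heq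
        rw [List.mem_singleton] at hb
        exact hx (by rw [← hb, ← heq]; exact ha)
      rw [ih (combo ++ [x]) st hnd]
      simp [Function.comp_def, List.append_assoc]

-- ===== VERDICT (by name: the statement is the Claim_ definition above) =====
theorem unique_combinations_filter_spec : Claim_equal_unique_combinations_filter := by
  intro lol _
  show _ = _
  unfold unique_combinations_filter unique_combinations_filter_alt
  rw [dfs_eq lol [] _ List.nodup_nil]
  simp
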